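-- pv_equiv track=rewrite | github.com/derragmaria-code/image-compression-research | npp_facto study/facto_study_codec.py | coeffs_to_dc_ac
-- ===== SOURCE A (Python) =====
-- def coeffs_to_dc_ac(coeffs):
--     dc_s,ac_s,prev=[],[],0
--     for zz in coeffs:
--         dc=int(zz[0]); dc_s.append(dc-prev); prev=dc
--         zeros=0
--         for v in zz[1:]:
--             v=int(v)
--             if v==0: zeros+=1
--             else:
--                 while zeros>=16: ac_s.append((15,0)); zeros-=16
--                 ac_s.append((zeros,v)); zeros=0
--         ac_s.append((0,0))
--     return dc_s,ac_s
-- ===== SOURCE B (Python) =====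
-- def coeffs_to_dc_ac(coeffs):
--     dc_s, ac_s, prev = [], [], 0
--     for zz in coeffs:
--         dc = int(zz[0])
--         dc_s.append(dc - prev)
--         prev = dc
--         nz = [(i, int(v)) for i, v in enumerate(zz[1:]) if int(v) != 0]
--         prev_i = -1
--         for i, v in nz:
--             q, r = divmod(i - prev_i - 1, 16)
--             ac_s.extend([(15, 0)] * q)
--             ac_s.append((r, v))
--             prev_i = i
--         ac_s.append((0, 0))
--     return dc_s, ac_s
-- ===== Notes on version B (the rewrite author's own statement) =====
-- stated objective: alternative
-- what changed: Replaces A's running zero-counter with its inner while-loop by a two-pass scheme per block: first collect the nonzero AC coefficients with their positions, then derive each run length from the index gap to the previous nonzero and emit divmod(run,16) ZRL tokens at once.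
import Mathlib
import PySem

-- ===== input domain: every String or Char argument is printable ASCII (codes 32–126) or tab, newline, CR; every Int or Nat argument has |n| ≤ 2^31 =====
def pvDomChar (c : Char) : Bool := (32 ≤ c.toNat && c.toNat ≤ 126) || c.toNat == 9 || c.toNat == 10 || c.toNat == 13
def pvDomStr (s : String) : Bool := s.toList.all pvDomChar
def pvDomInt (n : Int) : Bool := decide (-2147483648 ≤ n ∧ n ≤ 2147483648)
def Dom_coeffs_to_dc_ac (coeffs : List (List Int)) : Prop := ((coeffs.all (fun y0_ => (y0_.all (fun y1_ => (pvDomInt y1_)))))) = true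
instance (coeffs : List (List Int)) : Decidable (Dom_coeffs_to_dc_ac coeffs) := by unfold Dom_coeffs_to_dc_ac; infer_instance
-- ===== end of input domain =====

-- B replaces A's running zero-counter + inner while-loop by an index-gap scheme over the
-- enumerated nonzero AC coefficients (alternative decomposition, same cost).


-- ===== PORT A =====
-- 'while zeros>=16: ac_s.append((15,0)); zeros-=16' (zeros is a count, kept as Nat)
def pyWhile (ac : List (Int × Int)) (zeros : Nat) : List (Int × Int) × Nat :=
  if h : 16 ≤ zeros then pyWhile (ac ++ [(15, 0)]) (zeros - 16) else (ac, zeros)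
  termination_by zeros
  decreasing_by omega

-- body of 'for v in zz[1:]' on state (ac_s, zeros)
def pyInnerStep (st : List (Int × Int) × Nat) (v : Int) : List (Int × Int) × Nat :=
  if v = 0 then (st.1, st.2 + 1)
  else
    let w := pyWhile st.1 st.2
    (w.1 ++ [((w.2 : Int), v)], 0)

-- body of 'for zz in coeffs' on state (dc_s, ac_s, prev); zz[0] = headD (Pre_ gives zz ≠ [])
def pyBlockStep (st : List Int × List (Int × Int) × Int) (zz : List Int) : List Int × List (Int × Int) × Int :=
  let dc := zz.headD 0
  let inner := (zz.drop 1).foldl pyInnerStep (st.2.1, 0)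
  (st.1 ++ [dc - st.2.2], inner.1 ++ [(0, 0)], dc)

def coeffs_to_dc_ac (coeffs : List (List Int)) : List Int × (List (Int × Int)) :=
  let st := coeffs.foldl pyBlockStep ([], [], 0)
  (st.1, st.2.1)

-- ===== PORT B =====
-- body of 'for i, v in nz' on state (ac_s, prev_i); q, r = divmod(i - prev_i - 1, 16)
def altRun (st : List (Int × Int) × Int) (p : Int × Int) : List (Int × Int) × Int :=
  let q := PySem.Int.floordiv (p.1 - st.2 - 1) 16
  let r := PySem.Int.mod (p.1 - st.2 - 1) 16
  (st.1 ++ List.replicate q.toNat (15, 0) ++ [(r, p.2)], p.1)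

-- body of 'for zz in coeffs' in B
def altBlockStep (st : List Int × List (Int × Int) × Int) (zz : List Int) : List Int × List (Int × Int) × Int :=
  let dc := zz.headD 0
  let nz := (PySem.List.enumerate (zz.drop 1)).filter (fun p => decide (p.2 ≠ 0))
  let inner := nz.foldl altRun (st.2.1, -1)
  (st.1 ++ [dc - st.2.2], inner.1 ++ [(0, 0)], dc)

def coeffs_to_dc_ac_alt (coeffs : List (List Int)) : List Int × (List (Int × Int)) :=
  let st := coeffs.foldl altBlockStep ([], [], 0)
  (st.1, st.2.1)

-- ===== PRECONDITION & SPEC =====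
-- Pre_ excludes exactly the inputs containing an empty block, on which A's 'zz[0]' raises IndexError.
def Pre_coeffs_to_dc_ac (coeffs : List (List Int)) : Prop := ∀ zz ∈ coeffs, zz ≠ []
instance (coeffs : List (List Int)) : Decidable (Pre_coeffs_to_dc_ac coeffs) := by unfold Pre_coeffs_to_dc_ac; infer_instance
def pvWitness_coeffs_to_dc_ac : List (List Int) := [[5, 0, 0, 3], [7, 1]]

def Spec_coeffs_to_dc_ac (coeffs : List (List Int)) (out : List Int × (List (Int × Int))) : Prop := out = coeffs_to_dc_ac_alt coeffs
instance (coeffs : List (List Int)) (out : List Int × (List (Int × Int))) : Decidable (Spec_coeffs_to_dc_ac coeffs out) := by unfold Spec_coeffs_to_dc_ac; infer_instance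

-- ===== CLAIM (what is proved, stated in full; the proofs are below) =====
def Claim_equal_coeffs_to_dc_ac : Prop := ∀ (coeffs : List (List Int)), Dom_coeffs_to_dc_ac coeffs → Pre_coeffs_to_dc_ac coeffs → Spec_coeffs_to_dc_ac coeffs (coeffs_to_dc_ac coeffs)

-- ===== LEMMAS AND PROOFS =====
-- A's while-loop emits zeros/16 ZRL tokens and leaves zeros%16
lemma pyWhile_eq (ac : List (Int × Int)) (z : Nat) :
    pyWhile ac z = (ac ++ List.replicate (z / 16) (15, 0), z % 16) := by
  induction z using Nat.strong_induction_on generalizing ac with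
  | _ z ih =>
    rw [pyWhile]
    split
    · rename_i h
      rw [ih (z - 16) (by omega)]
      have h1 : z / 16 = (z - 16) / 16 + 1 := by omega
      have h2 : z % 16 = (z - 16) % 16 := by omega
      simp [h1, ← h2, List.replicate_succ, List.append_assoc]
    · rename_i h
      have h1 : z / 16 = 0 := by omega
      have h2 : z % 16 = z := by omega
      simp [h1, h2]

-- core inner-loop equivalence: A's counter state vs B's index-gap state
lemma inner_eq (vs : List Int) (ac : List (Int × Int)) (z : Nat) (s pI : Int)
    (hinv : pI = s - (z : Int) - 1) :
    (vs.foldl pyInnerStep (ac, z)).1 =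
      (((PySem.List.enumerate vs s).filter (fun p => decide (p.2 ≠ 0))).foldl altRun (ac, pI)).1 := by
  induction vs generalizing ac z s pI with
  | nil => simp
  | cons v vs ih =>
    rw [PySem.List.enumerate_cons, List.filter_cons]
    by_cases hv : v = 0
    · subst hv
      simp only [List.foldl_cons, pyInnerStep, ne_eq, decide_not, decide_true,
        Bool.not_true, Bool.false_eq_true, if_false, if_true]
      simpa [decide_not] using ih ac (z + 1) (s + 1) pI (by push_cast; omega)
    · have hcond : (decide (((s, v)).2 ≠ 0)) = true := by simpa using hv
      rw [hcond, if_pos rfl]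
      simp only [List.foldl_cons, pyInnerStep, if_neg hv, pyWhile_eq, altRun]
      have hz : (s, v).1 - pI - 1 = ((z : Nat) : Int) := by simp [hinv]; ring
      have hq : PySem.Int.floordiv ((z : Nat) : Int) 16 = ((z / 16 : Nat) : Int) := by
        exact_mod_cast PySem.Int.floordiv_natCast z 16
      have hr : PySem.Int.mod ((z : Nat) : Int) 16 = ((z % 16 : Nat) : Int) := by
        exact_mod_cast PySem.Int.mod_natCast z 16
      rw [hz, hq, hr, Int.toNat_natCast]
      rw [ih _ 0 (s + 1) s (by push_cast; omega)]

lemma blockStep_eq (st : List Int × List (Int × Int) × Int) (zz : List Int) :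
    pyBlockStep st zz = altBlockStep st zz := by
  simp only [pyBlockStep, altBlockStep]
  rw [inner_eq (zz.drop 1) st.2.1 0 0 (-1) (by norm_num)]

-- ===== VERDICT (by name: the statement is the Claim_ definition above) =====
theorem coeffs_to_dc_ac_spec : Claim_equal_coeffs_to_dc_ac := by
  intro coeffs _ _
  unfold Spec_coeffs_to_dc_ac coeffs_to_dc_ac coeffs_to_dc_ac_alt
  have hf : pyBlockStep = altBlockStep := funext fun st => funext fun zz => blockStep_eq st zz
  rw [hf]
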